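-- pv_equiv track=rewrite | github.com/alialzein01/social-media-analytics | app/services/__init__.py | _aggregate_reactions
-- ===== SOURCE A (Python) =====
-- from typing import List, Dict, Optional, Any
--
-- def _aggregate_reactions(reactions_data: List[Dict]) -> Dict[str, Dict[str, int]]:
--     """
--     Aggregate individual reactions into counts by post and type.
--
--     Args:
--         reactions_data: List of individual reaction objects from reactions scraper
--
--     Returns:
--         Dict mapping post URL to reaction type counts
--         {
--             "post_url": {
--                 "like": 100,
--                 "love": 50,
--                 "haha": 30,
--                 "wow": 20,
--                 "sad": 10,
--                 "angry": 5
--             }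
--         }
--     """
--     from collections import defaultdict
--
--     aggregated = defaultdict(lambda: defaultdict(int))
--
--     for reaction in reactions_data:
--         post_url = reaction.get('postUrl', '')
--         reaction_type = reaction.get('reactionType', '').lower()
--
--         if post_url and reaction_type:
--             aggregated[post_url][reaction_type] += 1
--
--     # Convert defaultdict to regular dict
--     return {url: dict(counts) for url, counts in aggregated.items()}
-- ===== SOURCE B (Python) =====
-- from typing import List, Dict
-- from collections import Counter
--
-- def _aggregate_reactions(reactions_data: List[Dict]) -> Dict[str, Dict[str, int]]:
--     """Filter-and-normalize first, then group: keep (url, type.lower()) pairs with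
--     both parts non-empty, and build each post's counts with a Counter per URL."""
--     pairs = [(r.get('postUrl', ''), r.get('reactionType', '').lower())
--              for r in reactions_data]
--     pairs = [(u, t) for u, t in pairs if u and t]
--     return {u: dict(Counter(t for p, t in pairs if p == u))
--             for u in dict.fromkeys(p for p, _ in pairs)}
-- ===== Notes on version B (the rewrite author's own statement) =====
-- stated objective: alternative
-- what changed: Replaces the single-pass nested-defaultdict accumulation with a filter-and-normalize pass that extracts (url, lowered type) pairs, an ordered dedup of the URLs, and a per-URL Counter over the pair list.
import Mathlib
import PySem

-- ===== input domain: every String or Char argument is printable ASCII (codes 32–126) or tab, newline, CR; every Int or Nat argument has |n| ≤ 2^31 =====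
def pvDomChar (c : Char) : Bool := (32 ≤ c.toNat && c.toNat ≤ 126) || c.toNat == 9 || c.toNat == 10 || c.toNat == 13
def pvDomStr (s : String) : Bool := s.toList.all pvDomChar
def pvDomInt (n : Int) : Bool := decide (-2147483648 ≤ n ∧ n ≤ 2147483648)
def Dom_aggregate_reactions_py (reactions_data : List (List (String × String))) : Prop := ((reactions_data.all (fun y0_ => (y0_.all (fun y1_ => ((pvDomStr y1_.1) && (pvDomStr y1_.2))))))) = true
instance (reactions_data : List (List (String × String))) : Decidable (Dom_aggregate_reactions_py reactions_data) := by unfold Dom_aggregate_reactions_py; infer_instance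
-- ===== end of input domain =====

-- B groups by a filter-and-normalize pass, ordered dedup of URLs and a per-URL Counter
-- instead of A's single-pass nested defaultdict (alternative decomposition, same results).

-- ===== PORT A =====
def aggregate_reactions_py (reactions_data : List (List (String × String))) : List (String × List (String × Int)) :=
  let aggregated : PySem.Dict String (PySem.Dict String Int) :=
    reactions_data.foldl (fun agg reaction =>
      let post_url := (PySem.Dict.ofList reaction).getD "postUrl" ""
      let reaction_type := PySem.Str.lower ((PySem.Dict.ofList reaction).getD "reactionType" "")
      if post_url ≠ "" ∧ reaction_type ≠ "" then
        agg.modify post_url PySem.Dict.empty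
          (fun counts => counts.insert reaction_type (counts.getD reaction_type 0 + 1))
      else agg) PySem.Dict.empty
  aggregated.items.map (fun p => (p.1, p.2.items))

-- ===== PORT B =====
def aggregate_reactions_py_alt (reactions_data : List (List (String × String))) : List (String × List (String × Int)) :=
  let pairs0 := reactions_data.map (fun r =>
    ((PySem.Dict.ofList r).getD "postUrl" "",
     PySem.Str.lower ((PySem.Dict.ofList r).getD "reactionType" "")))
  let pairs := pairs0.filter (fun p => p.1 != "" && p.2 != "")
  (PySem.List.dedup (pairs.map (·.1))).map (fun u =>
    (u, (PySem.Dict.counter ((pairs.filter (fun p => p.1 == u)).map (·.2))).items))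

-- ===== PRECONDITION & SPEC =====
def Spec_aggregate_reactions_py (reactions_data : List (List (String × String))) (out : List (String × List (String × Int))) : Prop := out = aggregate_reactions_py_alt reactions_data
instance (reactions_data : List (List (String × String))) (out : List (String × List (String × Int))) : Decidable (Spec_aggregate_reactions_py reactions_data out) := by unfold Spec_aggregate_reactions_py; infer_instance

-- ===== CLAIM (what is proved, stated in full; the proofs are below) =====
def Claim_equal_aggregate_reactions_py : Prop := ∀ (reactions_data : List (List (String × String))), Dom_aggregate_reactions_py reactions_data → Spec_aggregate_reactions_py reactions_data (aggregate_reactions_py reactions_data)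

-- ===== LEMMAS AND PROOFS =====

-- the normalized (url, lowered type) pair of one reaction record
def pvPair (r : List (String × String)) : String × String :=
  ((PySem.Dict.ofList r).getD "postUrl" "",
   PySem.Str.lower ((PySem.Dict.ofList r).getD "reactionType" ""))

-- the filtered, normalized pair list both programs are really functions of
def pvPairs (rs : List (List (String × String))) : List (String × String) :=
  (rs.map pvPair).filter (fun p => p.1 != "" && p.2 != "")

-- one accumulation step of A, as a function of a pair
def pvBump (agg : PySem.Dict String (PySem.Dict String Int)) (p : String × String) :
    PySem.Dict String (PySem.Dict String Int) :=
  agg.modify p.1 PySem.Dict.empty (fun counts => counts.insert p.2 (counts.getD p.2 0 + 1))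

-- A's loop over the records is the bump-fold over the filtered pair list
lemma foldA_eq_foldBump (rs : List (List (String × String)))
    (agg : PySem.Dict String (PySem.Dict String Int)) :
    rs.foldl (fun agg reaction =>
      let post_url := (PySem.Dict.ofList reaction).getD "postUrl" ""
      let reaction_type := PySem.Str.lower ((PySem.Dict.ofList reaction).getD "reactionType" "")
      if post_url ≠ "" ∧ reaction_type ≠ "" then
        agg.modify post_url PySem.Dict.empty
          (fun counts => counts.insert reaction_type (counts.getD reaction_type 0 + 1))
      else agg) agg = (pvPairs rs).foldl pvBump agg := by
  induction rs generalizing agg with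
  | nil => rfl
  | cons r rs ih =>
      simp only [List.foldl_cons, pvPairs, List.map_cons, List.filter_cons, pvPair] at ih ⊢
      by_cases h1 : (PySem.Dict.ofList r).getD "postUrl" "" = ""
      · simp only [h1, ne_eq, not_true_eq_false, false_and, if_false, bne_self_eq_false,
          Bool.false_and, Bool.false_eq_true, if_false]
        exact ih agg
      · by_cases h2 : PySem.Str.lower ((PySem.Dict.ofList r).getD "reactionType" "") = ""
        · simp only [h1, h2, ne_eq, not_true_eq_false, and_false, if_false, bne_self_eq_false,
            Bool.and_false, Bool.false_eq_true, if_false]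
          exact ih agg
        · simp only [ne_eq, h1, h2, not_false_eq_true, and_self, if_true,
            ]
          have hb : (((PySem.Dict.ofList r).getD "postUrl" "" != "") &&
              (PySem.Str.lower ((PySem.Dict.ofList r).getD "reactionType" "") != "")) = true := by
            simp [h1, h2]
          rw [if_pos hb, List.foldl_cons]
          exact ih _

-- the inner dict at key u collects exactly the types of u's pairs
lemma getD_foldBump (ps : List (String × String))
    (d : PySem.Dict String (PySem.Dict String Int)) (u : String) :
    (ps.foldl pvBump d).getD u PySem.Dict.empty =
      ((ps.filter (fun p => p.1 == u)).map (·.2)).foldl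
        (fun c t => c.insert t (c.getD t 0 + 1)) (d.getD u PySem.Dict.empty) := by
  induction ps generalizing d with
  | nil => rfl
  | cons p ps ih =>
      simp only [List.foldl_cons, List.filter_cons]
      by_cases h : p.1 = u
      · simp only [h, beq_self_eq_true, if_pos, List.map_cons, List.foldl_cons]
        rw [ih]
        simp [pvBump, h, PySem.Dict.getD_modify_self]
      · have hb : (p.1 == u) = false := by simp [h]
        simp only [hb, Bool.false_eq_true, if_false]
        rw [ih]
        simp [pvBump, PySem.Dict.getD_modify_of_ne _ _ _ (Ne.symm h)]

-- ===== VERDICT (by name: the statement is the Claim_ definition above) =====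
theorem aggregate_reactions_py_spec : Claim_equal_aggregate_reactions_py := by
  intro rs _
  unfold Spec_aggregate_reactions_py aggregate_reactions_py aggregate_reactions_py_alt
  rw [foldA_eq_foldBump]
  show (List.foldl pvBump PySem.Dict.empty (pvPairs rs)).items.map (fun p => (p.1, p.2.items)) =
    (PySem.List.dedup ((pvPairs rs).map (·.1))).map (fun u =>
      (u, (PySem.Dict.counter (((pvPairs rs).filter (fun p => p.1 == u)).map (·.2))).items))
  have hkeysnd : ((pvPairs rs).foldl pvBump PySem.Dict.empty).keys.Nodup := by
    exact PySem.Dict.nodup_keys_foldl_modify_key (pvPairs rs) (fun p => p.1)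
      PySem.Dict.empty
      (fun _ p => fun counts => counts.insert p.2 (counts.getD p.2 0 + 1))
      PySem.Dict.empty (by simp [PySem.Dict.keys_empty])
  have hkeys : ((pvPairs rs).foldl pvBump PySem.Dict.empty).keys =
      PySem.List.dedup ((pvPairs rs).map (·.1)) := by
    exact PySem.Dict.keys_foldl_modify_key (pvPairs rs) (fun p => p.1)
      PySem.Dict.empty
      (fun _ p => fun counts => counts.insert p.2 (counts.getD p.2 0 + 1))
      PySem.Dict.empty
  rw [PySem.Dict.items_eq_map_keys _ hkeysnd PySem.Dict.empty, hkeys, List.map_map]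
  refine List.map_congr_left ?_
  intro u _
  simp only [Function.comp_apply]
  congr 1
  rw [getD_foldBump, PySem.Dict.getD_empty,
    PySem.Dict.foldl_insert_getD_add_one_eq_counter]
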